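-- pv_equiv track=rewrite | github.com/v0jt4s13/python-test | telewizja.py | strategia_c
-- ===== SOURCE A (Python) =====
-- def strategia_c(movie_list: list) -> dict:
--     earliest_start = movie_list[0]
--
--     for movie in movie_list:
--         if earliest_start['start'] > movie['start']:
--             earliest_start = movie
--         elif (earliest_start['start'] == movie['start']
--               and earliest_start['end'] > movie['end']):
--             earliest_start = movie
--     return earliest_start
-- ===== SOURCE B (Python) =====
-- def strategia_c(movie_list: list) -> dict:
--     return sorted(movie_list, key=lambda m: (m['start'], m['end']))[0]
-- ===== Notes on version B (the rewrite author's own statement) =====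
-- stated objective: alternative
-- what changed: Replaces the manual keep-first minimum scan with a stable sort by the (start, end) tuple key followed by taking the first element; stability preserves A's first-on-tie rule. Pre_ excludes the empty list (A raises IndexError) and movies missing a 'start' or 'end' key: A raises KeyError on most such inputs and evaluates 'end' only lazily on start-ties, whereas B's tuple key reads both keys of every movie.
import Mathlib
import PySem

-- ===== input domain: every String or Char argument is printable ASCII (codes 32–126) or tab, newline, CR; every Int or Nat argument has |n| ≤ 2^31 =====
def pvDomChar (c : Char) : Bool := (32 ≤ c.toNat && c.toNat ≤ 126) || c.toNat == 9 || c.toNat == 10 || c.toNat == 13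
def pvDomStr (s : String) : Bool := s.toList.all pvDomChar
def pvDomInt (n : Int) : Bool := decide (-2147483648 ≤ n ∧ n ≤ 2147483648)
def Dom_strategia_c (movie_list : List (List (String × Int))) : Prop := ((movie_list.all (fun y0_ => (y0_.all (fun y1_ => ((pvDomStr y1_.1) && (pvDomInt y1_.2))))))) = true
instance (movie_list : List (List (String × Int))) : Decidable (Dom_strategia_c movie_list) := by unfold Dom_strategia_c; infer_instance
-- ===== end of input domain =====

-- B replaces A's manual keep-first minimum scan by a stable sort on the (start, end) key
-- followed by taking the first element (alternative decomposition, not faster).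


-- ===== PORT A =====
-- A's loop: start from movie_list[0], replace the candidate whenever a movie has a
-- strictly smaller 'start', or an equal 'start' and strictly smaller 'end'.
def strategia_cStep (acc movie : List (String × Int)) : List (String × Int) :=
  if PySem.Dict.getD ⟨acc⟩ "start" (0:Int) > PySem.Dict.getD ⟨movie⟩ "start" (0:Int) then movie
  else if PySem.Dict.getD ⟨acc⟩ "start" (0:Int) = PySem.Dict.getD ⟨movie⟩ "start" (0:Int)
          ∧ PySem.Dict.getD ⟨acc⟩ "end" (0:Int) > PySem.Dict.getD ⟨movie⟩ "end" (0:Int) then movie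
  else acc

def strategia_c (movie_list : List (List (String × Int))) : List (String × Int) :=
  match movie_list with
  | [] => []          -- Python raises IndexError here; excluded by Pre_strategia_c
  | h :: _ => movie_list.foldl strategia_cStep h

-- ===== PORT B =====
def strategia_c_alt (movie_list : List (List (String × Int))) : List (String × Int) :=
  match PySem.List.sorted2 movie_list
          (fun m => PySem.Dict.getD ⟨m⟩ "start" (0:Int)) (fun m => PySem.Dict.getD ⟨m⟩ "end" (0:Int)) with
  | [] => []          -- Python raises IndexError here; excluded by Pre_strategia_c
  | m :: _ => m

-- ===== PRECONDITION & SPEC =====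
-- Pre_ excludes the empty list (A raises IndexError) and movies missing a 'start' or 'end'
-- key: A raises KeyError on most such inputs and evaluates 'end' only lazily on start-ties,
-- whereas B's tuple key reads both keys of every movie (B raises KeyError there).
def Pre_strategia_c (movie_list : List (List (String × Int))) : Prop :=
  movie_list ≠ [] ∧ ∀ m ∈ movie_list, "start" ∈ m.map Prod.fst ∧ "end" ∈ m.map Prod.fst
instance (movie_list : List (List (String × Int))) : Decidable (Pre_strategia_c movie_list) := by unfold Pre_strategia_c; infer_instance

def pvWitness_strategia_c : (List (List (String × Int))) := [[("start", 3), ("end", 5)], [("start", 3), ("end", 4)]]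

def Spec_strategia_c (movie_list : List (List (String × Int))) (out : List (String × Int)) : Prop := out = strategia_c_alt movie_list
instance (movie_list : List (List (String × Int))) (out : List (String × Int)) : Decidable (Spec_strategia_c movie_list out) := by unfold Spec_strategia_c; infer_instance

-- ===== CLAIM (what is proved, stated in full; the proofs are below) =====
def Claim_equal_strategia_c : Prop := ∀ (movie_list : List (List (String × Int))), Dom_strategia_c movie_list → Pre_strategia_c movie_list → Spec_strategia_c movie_list (strategia_c movie_list)

-- ===== LEMMAS AND PROOFS =====

-- the lexicographic "strictly before" test used inside PySem.List.sorted2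
def pvLt (x m : List (String × Int)) : Bool :=
  decide (PySem.Dict.getD ⟨x⟩ "start" (0:Int) < PySem.Dict.getD ⟨m⟩ "start" (0:Int)) ||
  (!decide (PySem.Dict.getD ⟨m⟩ "start" (0:Int) < PySem.Dict.getD ⟨x⟩ "start" (0:Int)) &&
   decide (PySem.Dict.getD ⟨x⟩ "end" (0:Int) < PySem.Dict.getD ⟨m⟩ "end" (0:Int)))

def pvMinStep {α : Type} (before : α → α → Bool) (o : Option α) (x : α) : Option α :=
  some (match o with
        | none => x
        | some m => if before x m then x else m)

lemma head?_insertBy {α : Type} (before : α → α → Bool) (x : α) (ys : List α) :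
    (PySem.List.insertBy before x ys).head? =
      some (match ys.head? with
            | none => x
            | some y => if before x y then x else y) := by
  cases ys with
  | nil => simp [PySem.List.insertBy]
  | cons y ys => by_cases h : before x y <;> simp [PySem.List.insertBy, h]

lemma head?_foldl_insertBy {α : Type} (before : α → α → Bool) :
    ∀ (xs : List α) (acc : List α),
      (xs.foldl (fun acc x => PySem.List.insertBy before x acc) acc).head? =
      xs.foldl (pvMinStep before) acc.head? := by
  intro xs
  induction xs with
  | nil => intro acc; simp
  | cons x xs ih =>
    intro acc
    simp only [List.foldl_cons]
    rw [ih, head?_insertBy]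
    rfl

lemma step_eq_ltStep (acc x : List (String × Int)) :
    strategia_cStep acc x = if pvLt x acc then x else acc := by
  unfold strategia_cStep pvLt
  rcases lt_trichotomy (PySem.Dict.getD ⟨x⟩ "start" (0:Int)) (PySem.Dict.getD ⟨acc⟩ "start" (0:Int)) with h | h | h
  · simp [h, not_lt_of_gt h]
  · simp [h]
  · simp [h, not_lt_of_gt h]
    intro h2 _
    exact absurd h2 (by omega)

lemma foldl_step_eq (t : List (List (String × Int))) :
    ∀ m, t.foldl (pvMinStep pvLt) (some m) = some (t.foldl strategia_cStep m) := by
  induction t with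
  | nil => intro m; simp
  | cons x t ih =>
    intro m
    simp only [List.foldl_cons, pvMinStep, step_eq_ltStep]
    exact ih _

lemma step_self (m : List (String × Int)) : strategia_cStep m m = m := by
  simp [strategia_cStep]

lemma sorted2_eq_foldl (xs : List (List (String × Int))) :
    PySem.List.sorted2 xs
        (fun m => PySem.Dict.getD ⟨m⟩ "start" (0:Int)) (fun m => PySem.Dict.getD ⟨m⟩ "end" (0:Int))
      = xs.foldl (fun acc x => PySem.List.insertBy pvLt x acc) [] := rfl

-- ===== VERDICT (by name: the statement is the Claim_ definition above) =====
theorem strategia_c_spec : Claim_equal_strategia_c := by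
  intro movie_list _ hpre
  unfold Spec_strategia_c
  obtain ⟨hne, -⟩ := hpre
  cases movie_list with
  | nil => exact absurd rfl hne
  | cons h t =>
    have hsorted :
        (PySem.List.sorted2 (h :: t)
            (fun m => PySem.Dict.getD ⟨m⟩ "start" (0:Int))
            (fun m => PySem.Dict.getD ⟨m⟩ "end" (0:Int))).head?
          = some (t.foldl strategia_cStep h) := by
      rw [sorted2_eq_foldl, head?_foldl_insertBy]
      simp only [List.foldl_cons, List.head?_nil]
      exact foldl_step_eq t h
    unfold strategia_c_alt strategia_c
    simp only [List.foldl_cons, step_self]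
    cases hs : PySem.List.sorted2 (h :: t)
        (fun m => PySem.Dict.getD ⟨m⟩ "start" (0:Int))
        (fun m => PySem.Dict.getD ⟨m⟩ "end" (0:Int)) with
    | nil => rw [hs] at hsorted; simp at hsorted
    | cons m rest =>
      rw [hs] at hsorted
      simp only [List.head?_cons, Option.some.injEq] at hsorted
      exact hsorted.symm
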